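-- pv_equiv track=rewrite | github.com/xacxvv/table | parsers.py | _detect_week_from_classes
-- ===== SOURCE A (Python) =====
-- from typing import Dict, Iterable, List, Optional, Tuple
--
-- def _detect_week_from_classes(classes: Iterable[str]) -> Optional[str]:
--     for cls in classes:
--         lower = cls.lower()
--         if "odd" in lower or "week1" in lower or "aweek" in lower:
--             return "odd"
--         if "even" in lower or "week2" in lower or "bweek" in lower:
--             return "even"
--     return None
-- ===== SOURCE B (Python) =====
-- def _detect_week_from_classes(classes):
--     lows = [c.lower() for c in classes]
--     n = len(lows)
--
--     def first_idx(marks):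
--         return next((i for i, s in enumerate(lows) if any(m in s for m in marks)), n)
--
--     i = first_idx(("odd", "week1", "aweek"))
--     j = first_idx(("even", "week2", "bweek"))
--     if i == n and j == n:
--         return None
--     return "odd" if i <= j else "even"
-- ===== Notes on version B (the rewrite author's own statement) =====
-- stated objective: alternative
-- what changed: Replaces A's single early-return loop with per-class branch chains by two staged passes: compute the index of the first class containing an odd marker and the index of the first class containing an even marker, then decide by comparing the two indices (ties go to odd, matching A's in-class priority).
import Mathlib
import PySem

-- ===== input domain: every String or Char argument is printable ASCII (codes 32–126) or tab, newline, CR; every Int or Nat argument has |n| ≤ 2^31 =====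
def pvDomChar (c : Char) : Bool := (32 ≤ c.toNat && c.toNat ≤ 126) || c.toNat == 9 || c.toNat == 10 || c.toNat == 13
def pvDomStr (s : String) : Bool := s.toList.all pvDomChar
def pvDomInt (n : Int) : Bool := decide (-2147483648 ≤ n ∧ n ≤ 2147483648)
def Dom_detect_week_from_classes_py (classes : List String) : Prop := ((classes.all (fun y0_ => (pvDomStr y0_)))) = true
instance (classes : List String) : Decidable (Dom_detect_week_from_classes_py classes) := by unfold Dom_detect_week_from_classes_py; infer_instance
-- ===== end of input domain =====

-- B computes the first odd-marker class index and the first even-marker class index in two staged passes and decides by comparing them, instead of A's early-return loop; same cost, alternative structure.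


-- ===== PORT A =====
def detect_week_from_classes_py : List String → Option String
  | [] => none
  | cls :: rest =>
    let lower := PySem.Str.lower cls
    if PySem.Str.isIn "odd" lower || PySem.Str.isIn "week1" lower || PySem.Str.isIn "aweek" lower then
      some "odd"
    else if PySem.Str.isIn "even" lower || PySem.Str.isIn "week2" lower || PySem.Str.isIn "bweek" lower then
      some "even"
    else detect_week_from_classes_py rest

-- ===== PORT B =====
-- any(m in s for m in marks)
def pvHasAny (marks : List String) (s : String) : Bool :=
  marks.any (fun m => PySem.Str.isIn m s)

-- next((i for i, s in enumerate(lows) if any(m in s for m in marks)), n):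
-- List.findIdx returns the list's length when no element matches, which is n.
def pvFirstIdx (lows : List String) (marks : List String) : Nat :=
  lows.findIdx (pvHasAny marks)

def detect_week_from_classes_py_alt (classes : List String) : Option String :=
  let lows := classes.map PySem.Str.lower
  let n := lows.length
  let i := pvFirstIdx lows ["odd", "week1", "aweek"]
  let j := pvFirstIdx lows ["even", "week2", "bweek"]
  if i = n ∧ j = n then none
  else if i ≤ j then some "odd" else some "even"

-- ===== PRECONDITION & SPEC =====
def Spec_detect_week_from_classes_py (classes : List String) (out : Option String) : Prop := out = detect_week_from_classes_py_alt classes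
instance (classes : List String) (out : Option String) : Decidable (Spec_detect_week_from_classes_py classes out) := by unfold Spec_detect_week_from_classes_py; infer_instance

-- ===== CLAIM (what is proved, stated in full; the proofs are below) =====
def Claim_equal_detect_week_from_classes_py : Prop := ∀ (classes : List String), Dom_detect_week_from_classes_py classes → Spec_detect_week_from_classes_py classes (detect_week_from_classes_py classes)

-- ===== LEMMAS AND PROOFS =====
theorem findIdx_le_length {α : Type} (p : α → Bool) (l : List α) : l.findIdx p ≤ l.length := by
  induction l with
  | nil => simp
  | cons a l ih =>
    by_cases h : p a <;> simp [List.findIdx_cons, h] <;> omega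

theorem alt_cons (cls : String) (rest : List String) :
    detect_week_from_classes_py_alt (cls :: rest) =
      if pvHasAny ["odd", "week1", "aweek"] (PySem.Str.lower cls) then some "odd"
      else if pvHasAny ["even", "week2", "bweek"] (PySem.Str.lower cls) then some "even"
      else detect_week_from_classes_py_alt rest := by
  simp only [detect_week_from_classes_py_alt, pvFirstIdx, List.map_cons, List.length_cons,
    List.findIdx_cons]
  by_cases h1 : pvHasAny ["odd", "week1", "aweek"] (PySem.Str.lower cls) <;>
    by_cases h2 : pvHasAny ["even", "week2", "bweek"] (PySem.Str.lower cls) <;>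
      simp only [h1, h2, cond_true, cond_false, if_true, Bool.false_eq_true, if_false]
  · have hj := findIdx_le_length (pvHasAny ["even", "week2", "bweek"]) (rest.map PySem.Str.lower)
    simp only [List.length_map] at hj
    rw [if_neg (by omega), if_pos (by omega)]
  · rw [if_neg (by omega), if_pos (by omega)]
  · rw [if_neg (by omega), if_neg (by omega)]
  · have e1 : ((rest.map PySem.Str.lower).findIdx (pvHasAny ["odd", "week1", "aweek"]) + 1 =
        (rest.map PySem.Str.lower).length + 1 ∧
        (rest.map PySem.Str.lower).findIdx (pvHasAny ["even", "week2", "bweek"]) + 1 =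
        (rest.map PySem.Str.lower).length + 1) ↔
        ((rest.map PySem.Str.lower).findIdx (pvHasAny ["odd", "week1", "aweek"]) =
        (rest.map PySem.Str.lower).length ∧
        (rest.map PySem.Str.lower).findIdx (pvHasAny ["even", "week2", "bweek"]) =
        (rest.map PySem.Str.lower).length) := by omega
    have e2 : ((rest.map PySem.Str.lower).findIdx (pvHasAny ["odd", "week1", "aweek"]) + 1 ≤
        (rest.map PySem.Str.lower).findIdx (pvHasAny ["even", "week2", "bweek"]) + 1) ↔
        ((rest.map PySem.Str.lower).findIdx (pvHasAny ["odd", "week1", "aweek"]) ≤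
        (rest.map PySem.Str.lower).findIdx (pvHasAny ["even", "week2", "bweek"])) := by omega
    simp only [e1, e2]
    rfl

theorem hasAny_odd (s : String) :
    pvHasAny ["odd", "week1", "aweek"] s =
      (PySem.Str.isIn "odd" s || PySem.Str.isIn "week1" s || PySem.Str.isIn "aweek" s) := by
  simp [pvHasAny, Bool.or_assoc]

theorem hasAny_even (s : String) :
    pvHasAny ["even", "week2", "bweek"] s =
      (PySem.Str.isIn "even" s || PySem.Str.isIn "week2" s || PySem.Str.isIn "bweek" s) := by
  simp [pvHasAny, Bool.or_assoc]

theorem alt_agrees (classes : List String) :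
    detect_week_from_classes_py classes = detect_week_from_classes_py_alt classes := by
  induction classes with
  | nil => rfl
  | cons cls rest ih =>
    rw [alt_cons, hasAny_odd, hasAny_even]
    simp only [detect_week_from_classes_py, ih]

-- ===== VERDICT (by name: the statement is the Claim_ definition above) =====
theorem detect_week_from_classes_py_spec : Claim_equal_detect_week_from_classes_py := by
  intro classes _
  exact alt_agrees classes
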